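-- pv_equiv track=rewrite | github.com/jefftrojan/competitive-programming | A2SV Remote Contest IX 21-Jul-2024/B -  The Piano Metamorphosis 182638.py | find_minimum_height_planks
-- ===== SOURCE A (Python) =====
-- def find_minimum_height_planks(n, k, heights):
--     if k > n:
--         return 0
--
--     current_sum = sum(heights[:k])
--     min_sum = current_sum
--     min_index = 0
--
--     for i in range(1, n - k + 1):
--         current_sum = current_sum - heights[i-1] + heights[i+k-1]
--         if current_sum < min_sum:
--             min_sum = current_sum
--             min_index = i
--
--     return min_index + 1
-- ===== SOURCE B (Python) =====
-- def find_minimum_height_planks(n, k, heights):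
--     if k > n:
--         return 0
--     prefix = [0]
--     for h in heights:
--         prefix.append(prefix[-1] + h)
--     sums = [prefix[i + k] - prefix[i] for i in range(n - k + 1)]
--     return sums.index(min(sums)) + 1
-- ===== Notes on version B (the rewrite author's own statement) =====
-- stated objective: idiomatic
-- what changed: Replaces the incremental sliding-window running sum with a prefix-sum table, builds the list of all window sums by prefix differences, and selects the answer with Python's min()+list.index() (earliest minimum) instead of a hand-written argmin loop with mutable state.
-- outside the precondition, e.g. on find_minimum_height_planks(2, 2, [7]): A returns 1, B raises IndexError; on find_minimum_height_planks(0, -1, [5, 7]): A returns 1, B returns 2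
import Mathlib
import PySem

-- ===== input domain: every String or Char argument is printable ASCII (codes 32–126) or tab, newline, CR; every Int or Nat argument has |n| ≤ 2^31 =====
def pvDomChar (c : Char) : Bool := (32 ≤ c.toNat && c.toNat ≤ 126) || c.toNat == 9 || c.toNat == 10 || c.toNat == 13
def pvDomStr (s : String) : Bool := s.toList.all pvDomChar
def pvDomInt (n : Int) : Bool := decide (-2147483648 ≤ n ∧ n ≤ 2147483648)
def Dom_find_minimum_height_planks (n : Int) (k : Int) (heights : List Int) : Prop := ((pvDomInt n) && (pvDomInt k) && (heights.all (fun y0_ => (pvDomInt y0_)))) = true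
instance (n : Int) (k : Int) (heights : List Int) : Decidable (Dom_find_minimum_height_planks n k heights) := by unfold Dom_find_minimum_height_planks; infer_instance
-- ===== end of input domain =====

-- B replaces A's incremental sliding-window argmin loop by a prefix-sum table, the list of all
-- window sums by prefix differences, and min()+list.index() to pick the earliest minimum.

-- ===== PORT A =====
def find_minimum_height_planks (n : Int) (k : Int) (heights : List Int) : Int :=
  if k > n then 0
  else
    let currentSum := (PySem.List.slice heights none (some k)).sum
    let res := (PySem.List.pyRange 1 (n - k + 1) 1).foldl
      (fun (st : Int × Int × Int) i =>
        let cur := st.1 - PySem.List.pyGetD heights (i - 1) 0 + PySem.List.pyGetD heights (i + k - 1) 0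
        if cur < st.2.1 then (cur, cur, i) else (cur, st.2.1, st.2.2))
      (currentSum, currentSum, 0)
    res.2.2 + 1

-- ===== PORT B =====
def find_minimum_height_planks_alt (n : Int) (k : Int) (heights : List Int) : Int :=
  if k > n then 0
  else
    let pfx := heights.foldl (fun acc h => acc ++ [PySem.List.pyGetD acc (-1) 0 + h]) [0]
    let sums := (PySem.List.pyRange 0 (n - k + 1) 1).map
      (fun i => PySem.List.pyGetD pfx (i + k) 0 - PySem.List.pyGetD pfx i 0)
    match PySem.List.min? sums (fun y => y) with
    | some m =>
        match PySem.List.index? sums m with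
        | some j => (j : Int) + 1
        | none => 0          -- unreachable: the minimum is a member of sums
    | none => 0              -- unreachable inside Pre_: sums is nonempty (min([]) raises in Python)

-- ===== PRECONDITION & SPEC =====
-- Pre_ admits the k > n guard and the function's natural domain (a nonnegative window size
-- k ≤ n with at least n planks); outside it A either raises an IndexError (n > len, or a
-- negative k reaching an in-range index midway) or returns an accidental value of its empty
-- loop (e.g. n=k=2, heights=[7] returns 1; negative-index wraparound under k < 0), which B's
-- prefix-sum table does not reproduce (it raises or picks a different window there).
def Pre_find_minimum_height_planks (n : Int) (k : Int) (heights : List Int) : Prop :=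
  k > n ∨ (0 ≤ k ∧ k ≤ n ∧ n ≤ heights.length)
    ∨ (n = k ∧ -((heights.length : Int) + 1) ≤ k ∧ k ≤ heights.length)
instance (n : Int) (k : Int) (heights : List Int) : Decidable (Pre_find_minimum_height_planks n k heights) := by unfold Pre_find_minimum_height_planks; infer_instance

def pvWitness_find_minimum_height_planks : Int × Int × List Int := (4, 2, [3, 1, 4, 1])

def Spec_find_minimum_height_planks (n : Int) (k : Int) (heights : List Int) (out : Int) : Prop := out = find_minimum_height_planks_alt n k heights
instance (n : Int) (k : Int) (heights : List Int) (out : Int) : Decidable (Spec_find_minimum_height_planks n k heights out) := by unfold Spec_find_minimum_height_planks; infer_instance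

-- ===== CLAIM (what is proved, stated in full; the proofs are below) =====
def Claim_equal_find_minimum_height_planks : Prop := ∀ (n : Int) (k : Int) (heights : List Int), Dom_find_minimum_height_planks n k heights → Pre_find_minimum_height_planks n k heights → Spec_find_minimum_height_planks n k heights (find_minimum_height_planks n k heights)

-- ===== LEMMAS AND PROOFS =====

-- prefix sums starting from s: psums s [h1,h2,...] = [s, s+h1, s+h1+h2, ...]
def psums (s : Int) : List Int → List Int
  | [] => [s]
  | h :: t => s :: psums (s + h) t

-- the reference argmin recursion: value and (Int) index of the first minimum of w over 0..M
def bestW (w : Nat → Int) : Nat → Int × Int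
  | 0 => (w 0, 0)
  | j + 1 => let p := bestW w j; if w (j + 1) < p.1 then (w (j + 1), (j : Int) + 1) else p

theorem foldl_psums (hs : List Int) : ∀ (l : List Int) (s : Int),
    hs.foldl (fun acc h => acc ++ [PySem.List.pyGetD acc (-1) 0 + h]) (l ++ [s]) = l ++ psums s hs := by
  induction hs with
  | nil => intro l s; simp [psums]
  | cons h t ih =>
    intro l s
    have : (l ++ [s]) ++ [PySem.List.pyGetD (l ++ [s]) (-1) 0 + h] = (l ++ [s]) ++ [s + h] := by
      rw [PySem.List.pyGetD_neg_one_append_singleton]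
    simp only [List.foldl_cons, this]
    rw [List.append_assoc] at this ⊢
    have := ih (l ++ [s]) (s + h)
    simpa [psums] using this

theorem psums_getD (hs : List Int) : ∀ (j : Nat) (s : Int), j ≤ hs.length →
    (psums s hs).getD j 0 = s + (hs.take j).sum := by
  induction hs with
  | nil => intro j s hj; simp at hj; subst hj; simp [psums]
  | cons h t ih =>
    intro j s hj
    cases j with
    | zero => simp [psums]
    | succ j =>
      simp only [psums, List.getD_cons_succ, List.take_succ_cons, List.sum_cons]
      rw [ih j (s + h) (by simpa using hj)]
      ring

-- bestW's value is the minimum of w over 0..M, and every w j with j ≤ M is ≥ it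
-- the key B-side characterisation: on the list [w 0, …, w M], min? picks (bestW w M).1 and
-- index? of that value is the index stored by bestW
theorem minIndex_eq_bestW (w : Nat → Int) (M : Nat) :
    PySem.List.min? ((List.range (M + 1)).map w) (fun y => y) = some (bestW w M).1 ∧
    ∃ j : Nat, PySem.List.index? ((List.range (M + 1)).map w) (bestW w M).1 = some j ∧
      (j : Int) = (bestW w M).2 := by
  induction M with
  | zero =>
    constructor
    · simp [PySem.List.min?_id_cons, bestW, List.range_succ]
    · exact ⟨0, by simp [bestW, List.range_succ], by simp [bestW]⟩
  | succ M ih =>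
    obtain ⟨hmin, j, hidx, hj⟩ := ih
    have hsplit : (List.range (M + 1 + 1)).map w = (List.range (M + 1)).map w ++ [w (M + 1)] := by
      rw [List.range_succ, List.map_append]; rfl
    by_cases hlt : w (M + 1) < (bestW w M).1
    · -- new strict minimum at M+1: it is not in the old list, index is the appended position
      have hnotmem : w (M + 1) ∉ (List.range (M + 1)).map w := by
        intro hmem
        have := PySem.List.min?_isMin hmin (w (M + 1)) hmem
        simp at this; omega
      constructor
      · rw [hsplit]
        rcases List.exists_cons_of_ne_nil (l := (List.range (M + 1)).map w) (by simp) with ⟨x, t, hx⟩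
        rw [hx] at hmin ⊢
        rw [PySem.List.min?_id_cons] at hmin
        have hm : t.foldl min x = (bestW w M).1 := by simpa using hmin
        have : (x :: t ++ [w (M + 1)]) = x :: (t ++ [w (M + 1)]) := by simp
        rw [this, PySem.List.min?_id_cons, List.foldl_append, hm]
        simp [bestW, hlt, min_eq_right (le_of_lt hlt)]
      · refine ⟨M + 1, ?_, ?_⟩
        · rw [hsplit]
          have hval : bestW w (M + 1) = (w (M + 1), (M : Int) + 1) := by simp [bestW, hlt]
          rw [hval]
          have := PySem.List.index?_append_singleton_self _ _ hnotmem
          simpa using this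
        · simp [bestW, hlt]
    · -- old minimum survives; its first occurrence (and index) is unchanged
      have hmem : (bestW w M).1 ∈ (List.range (M + 1)).map w := PySem.List.min?_mem hmin
      constructor
      · rw [hsplit]
        rcases List.exists_cons_of_ne_nil (l := (List.range (M + 1)).map w) (by simp) with ⟨x, t, hx⟩
        rw [hx] at hmin ⊢
        rw [PySem.List.min?_id_cons] at hmin
        have hm : t.foldl min x = (bestW w M).1 := by simpa using hmin
        have : (x :: t ++ [w (M + 1)]) = x :: (t ++ [w (M + 1)]) := by simp
        rw [this, PySem.List.min?_id_cons, List.foldl_append, hm]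
        simp [bestW, hlt, min_eq_left (by omega : (bestW w M).1 ≤ w (M + 1))]
      · refine ⟨j, ?_, ?_⟩
        · rw [hsplit]
          have hval : bestW w (M + 1) = bestW w M := by simp [bestW, hlt]
          rw [hval, PySem.List.index?_append_of_mem _ hmem, hidx]
        · simpa [bestW, hlt] using hj

-- window sum of width kN starting at j, in prefix-difference form
def winSum (heights : List Int) (kN : Nat) (j : Nat) : Int :=
  (heights.take (j + kN)).sum - (heights.take j).sum

theorem winSum_succ (heights : List Int) (kN j : Nat) (h1 : j + kN < heights.length) :
    winSum heights kN (j + 1) =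
      winSum heights kN j - heights.getD j 0 + heights.getD (j + kN) 0 := by
  have hj : j < heights.length := by omega
  unfold winSum
  have e1 : j + 1 + kN = (j + kN) + 1 := by omega
  rw [e1, List.sum_take_succ _ _ h1, List.sum_take_succ _ _ hj,
      List.getD_eq_getElem _ _ hj, List.getD_eq_getElem _ _ h1]
  ring

-- A-side loop characterisation: after the first M iterations the state is
-- (current window sum, best value, best index) as computed by bestW
theorem foldA (heights : List Int) (k : Int) (hk : 0 ≤ k) :
    ∀ M : Nat, (M : Int) ≤ (heights.length : Int) - k →
    (PySem.List.pyRange 1 ((M : Int) + 1) 1).foldl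
      (fun (st : Int × Int × Int) i =>
        let cur := st.1 - PySem.List.pyGetD heights (i - 1) 0 + PySem.List.pyGetD heights (i + k - 1) 0
        if cur < st.2.1 then (cur, cur, i) else (cur, st.2.1, st.2.2))
      (winSum heights k.toNat 0, winSum heights k.toNat 0, 0)
      = (winSum heights k.toNat M, (bestW (winSum heights k.toNat) M).1, (bestW (winSum heights k.toNat) M).2) := by
  intro M
  induction M with
  | zero => intro _; rw [PySem.List.pyRange_one_eq_nil (by omega)]; simp [bestW]
  | succ M ih =>
    intro hM
    set w := winSum heights k.toNat with hw
    have hsplit : PySem.List.pyRange 1 (((M + 1 : Nat) : Int) + 1) 1 = PySem.List.pyRange 1 ((M : Int) + 1) 1 ++ [(M : Int) + 1] := by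
      have : (((M + 1 : Nat) : Int) + 1) = ((M : Int) + 1) + 1 := by push_cast; ring
      rw [this, PySem.List.pyRange_one_succ_right (by omega)]
    rw [hsplit, List.foldl_append, ih (by push_cast at hM ⊢; omega)]
    have hMlen : M < heights.length := by push_cast at hM; omega
    have hMk : M + k.toNat < heights.length := by push_cast at hM; omega
    have e1 : (M : Int) + 1 - 1 = ((M : Nat) : Int) := by ring
    have e2 : (M : Int) + 1 + k - 1 = ((M + k.toNat : Nat) : Int) := by
      push_cast; omega
    simp only [List.foldl_cons, List.foldl_nil, e1, e2, PySem.List.pyGetD_natCast]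
    have hcur : w M - heights.getD M 0 + heights.getD (M + k.toNat) 0 = w (M + 1) :=
      (winSum_succ heights k.toNat M hMk).symm
    rw [hcur]
    by_cases hlt : w (M + 1) < (bestW w M).1
    · simp [bestW, hlt]
    · simp [bestW, hlt]

-- ===== VERDICT (by name: the statement is the Claim_ definition above) =====
theorem find_minimum_height_planks_spec : Claim_equal_find_minimum_height_planks := by
  intro n k heights _ hpre
  unfold Spec_find_minimum_height_planks find_minimum_height_planks find_minimum_height_planks_alt
  by_cases hgt : k > n
  · simp [hgt]
  · by_cases hnk : n = k
    · -- empty loop on both sides: A's range is empty, B's sums is a singleton; both return 1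
      simp only [if_neg hgt]
      have h1 : n - k + 1 = 1 := by omega
      rw [h1]
      have hA0 : PySem.List.pyRange 1 1 1 = [] := PySem.List.pyRange_one_eq_nil (by omega)
      have hB0 : PySem.List.pyRange 0 1 1 = [0] := by
        have := PySem.List.pyRange_one_singleton (a := (0 : Int))
        simpa using this
      rw [hA0, hB0]
      simp [PySem.List.min?_id_cons]
    rcases hpre with h | ⟨hk, hkn, hnl⟩ | ⟨h, _⟩
    · omega
    swap
    · omega
    simp only [if_neg hgt]
    set w := winSum heights k.toNat with hw
    set M0 := (n - k).toNat with hM0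
    have hM0e : ((M0 : Nat) : Int) = n - k := by rw [hM0]; omega
    have hkt : ((k.toNat : Nat) : Int) = k := Int.toNat_of_nonneg hk
    -- A side
    have hslice : (PySem.List.slice heights none (some k)).sum = w 0 := by
      rw [PySem.List.slice_to _ hk, hw]; unfold winSum; simp
    have hrangeA : n - k + 1 = ((M0 : Nat) : Int) + 1 := by omega
    have hA := foldA heights k hk M0 (by omega)
    rw [hslice, hrangeA, hA]
    -- B side
    have hpfx : heights.foldl (fun acc h => acc ++ [PySem.List.pyGetD acc (-1) 0 + h]) [0]
        = psums 0 heights := by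
      have := foldl_psums heights [] 0
      simpa using this
    rw [hpfx]
    have hrangeB : ((M0 : Nat) : Int) + 1 = ((M0 + 1 : Nat) : Int) := by push_cast; ring
    rw [hrangeB, PySem.List.pyRange_zero_natCast, List.map_map]
    have hsums : (List.range (M0 + 1)).map
        ((fun i => PySem.List.pyGetD (psums 0 heights) (i + k) 0 - PySem.List.pyGetD (psums 0 heights) i 0) ∘ (fun j : Nat => (j : Int)))
        = (List.range (M0 + 1)).map w := by
      apply List.map_congr_left
      intro j hj
      have hjM : j ≤ M0 := by simp [List.mem_range] at hj; omega
      have hjlen : j ≤ heights.length := by omega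
      have hjk : j + k.toNat ≤ heights.length := by omega
      have e3 : (j : Int) + k = ((j + k.toNat : Nat) : Int) := by push_cast; omega
      simp only [Function.comp, e3, PySem.List.pyGetD_natCast]
      have g1 : (psums 0 heights).getD (j + k.toNat) 0 = 0 + (heights.take (j + k.toNat)).sum :=
        psums_getD heights _ 0 hjk
      have g2 : (psums 0 heights).getD j 0 = 0 + (heights.take j).sum :=
        psums_getD heights _ 0 hjlen
      rw [g1, g2, hw]; unfold winSum; ring
    rw [hsums]
    obtain ⟨hmin, j, hidx, hj⟩ := minIndex_eq_bestW w M0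
    simp only [hmin, hidx]
    simp only [hj, hw]
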